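-- pv_equiv track=rewrite | github.com/parasiitism/AlgoDaily | leetcode/1966-binary-searchable-numbers-in-an-unsorted-array/main.py | binarySearchableNumbers
-- ===== SOURCE A (Python) =====
-- from typing import List
--
-- def binarySearchableNumbers(nums: List[int]) -> int:
--     n = len(nums)
--     res = 0
--     prefix = n * [False]
--     preifx_max = nums[0]
--     suffix_min = nums[-1]
--     for i in range(n):
--         prefix[i] = preifx_max <= nums[i]
--         preifx_max = max(preifx_max, nums[i])
--     for i in range(n-1, -1, -1):
--         suffix_min = min(suffix_min, nums[i])
--         if prefix[i] and nums[i] <= suffix_min: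
--             res += 1
--     return res
-- ===== SOURCE B (Python) =====
-- from typing import List
--
-- def binarySearchableNumbers(nums: List[int]) -> int:
--     # single-pass monotonic stack: push candidates that are >= the running max,
--     # evict any candidate as soon as a smaller element appears after it;
--     # survivors are exactly the binary-searchable elements
--     stack = []
--     m = nums[0]
--     for x in nums:
--         while stack and stack[-1] > x:
--             stack.pop()
--         if m <= x:
--             stack.append(x)
--         m = max(m, x)
--     return len(stack)
-- ===== Notes on version B (the rewrite author's own statement) =====
-- stated objective: faster
-- what changed: Replaces A's two staged passes (a boolean prefix mask list, then a backward counting loop with a running suffix min) by a single forward pass maintaining a monotonic stack of candidate values: push x when it is >= the running max, pop candidates greater than the current element, return the stack size.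
import Mathlib
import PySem

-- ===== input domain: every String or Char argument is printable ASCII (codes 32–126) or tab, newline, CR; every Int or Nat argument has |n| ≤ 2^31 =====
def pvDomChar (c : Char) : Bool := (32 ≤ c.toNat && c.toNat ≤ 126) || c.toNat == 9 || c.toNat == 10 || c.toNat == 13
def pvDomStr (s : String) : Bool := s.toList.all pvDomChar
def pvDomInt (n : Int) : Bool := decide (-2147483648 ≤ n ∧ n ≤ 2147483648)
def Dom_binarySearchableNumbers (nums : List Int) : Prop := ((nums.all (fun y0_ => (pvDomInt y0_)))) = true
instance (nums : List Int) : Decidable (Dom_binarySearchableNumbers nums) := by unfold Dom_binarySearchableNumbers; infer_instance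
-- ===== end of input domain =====

-- B replaces A's two staged passes (boolean prefix mask, then backward counting loop with a
-- running suffix min) by a single forward pass over a monotonic stack of candidate values;
-- return values proved equal on nonempty input (A raises IndexError on [] — excluded by Pre_).

-- ===== PORT A =====
def binarySearchableNumbers (nums : List Int) : Int :=
  match PySem.List.pyGet? nums 0, PySem.List.pyGet? nums (-1) with
  | some h0, some l0 =>
    let n : Int := (nums.length : Int)
    -- for i in range(n): prefix[i] = preifx_max <= nums[i]; preifx_max = max(preifx_max, nums[i])
    let s1 := (PySem.List.pyRange 0 n 1).foldl
      (fun (st : List Bool × Int) i =>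
        (PySem.List.pySetD st.1 i (decide (st.2 ≤ PySem.List.pyGetD nums i 0)),
         max st.2 (PySem.List.pyGetD nums i 0)))
      (List.replicate nums.length false, h0)
    -- for i in range(n-1, -1, -1): suffix_min = min(suffix_min, nums[i]); if prefix[i] and nums[i] <= suffix_min: res += 1
    let s2 := (PySem.List.pyRange (n - 1) (-1) (-1)).foldl
      (fun (st : Int × Int) i =>
        let sm := min st.1 (PySem.List.pyGetD nums i 0)
        (sm, if PySem.List.pyGetD s1.1 i false && decide (PySem.List.pyGetD nums i 0 ≤ sm)
             then st.2 + 1 else st.2))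
      (l0, 0)
    s2.2
  | _, _ => 0  -- unreachable under Pre_ (Python raises IndexError on [])

-- ===== PORT B =====
-- while stack and stack[-1] > x: stack.pop()
def pvPop (x : Int) (st : List Int) : List Int :=
  match h : st.getLast? with
  | none => st
  | some t => if x < t then pvPop x st.dropLast else st
termination_by st.length
decreasing_by
  cases st with
  | nil => simp at h
  | cons a l => simp [List.length_dropLast]

def binarySearchableNumbers_alt (nums : List Int) : Int :=
  match PySem.List.pyGet? nums 0 with
  | none => 0  -- unreachable under Pre_ (Python raises IndexError on [])
  | some m0 =>
    -- for x in nums: pop; if m <= x: append x; m = max(m, x)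
    let st := nums.foldl
      (fun (s : List Int × Int) x =>
        let s1 := pvPop x s.1
        (if s.2 ≤ x then s1 ++ [x] else s1, max s.2 x))
      ([], m0)
    (st.1.length : Int)

-- ===== PRECONDITION & SPEC =====
-- Pre_ excludes exactly the empty list, on which A raises IndexError (nums[0]).
def Pre_binarySearchableNumbers (nums : List Int) : Prop := nums ≠ []
instance (nums : List Int) : Decidable (Pre_binarySearchableNumbers nums) := by
  unfold Pre_binarySearchableNumbers; infer_instance

def pvWitness_binarySearchableNumbers : List Int := [2, 1, 3]

def Spec_binarySearchableNumbers (nums : List Int) (out : Int) : Prop := out = binarySearchableNumbers_alt nums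
instance (nums : List Int) (out : Int) : Decidable (Spec_binarySearchableNumbers nums out) := by unfold Spec_binarySearchableNumbers; infer_instance

-- ===== CLAIM (what is proved, stated in full; the proofs are below) =====
def Claim_equal_binarySearchableNumbers : Prop := ∀ (nums : List Int), Dom_binarySearchableNumbers nums → Pre_binarySearchableNumbers nums → Spec_binarySearchableNumbers nums (binarySearchableNumbers nums)

-- ===== LEMMAS AND PROOFS =====

def pvFmax (nums : List Int) (j : Nat) : Int := (nums.take j).foldl max (nums.getD 0 0)
def pvSmin (nums : List Int) (j : Nat) : Int :=
  ((nums.drop j).reverse).foldl min (nums.getLast?.getD 0)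
def pvCond (nums : List Int) (j : Nat) : Bool :=
  decide (pvFmax nums j ≤ nums.getD j 0) && decide (nums.getD j 0 ≤ pvSmin nums j)
-- "j is still a live candidate after the first i elements have been processed"
def pvOK (nums : List Int) (i j : Nat) : Bool :=
  decide (pvFmax nums j ≤ nums.getD j 0) &&
  (List.range' j (i - j)).all (fun k => decide (nums.getD j 0 ≤ nums.getD k 0))

lemma fmax_succ (nums : List Int) (j : Nat) (hj : j < nums.length) :
    pvFmax nums (j+1) = max (pvFmax nums j) (nums.getD j 0) := by
  unfold pvFmax
  rw [List.take_add_one, List.getElem?_eq_getElem hj]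
  simp only [Option.toList_some, List.foldl_append, List.foldl_cons, List.foldl_nil,
    List.getD_eq_getElem?_getD, List.getElem?_eq_getElem hj, Option.getD_some]

lemma smin_step (nums : List Int) (j : Nat) (hj : j < nums.length) :
    pvSmin nums j = min (pvSmin nums (j+1)) (nums.getD j 0) := by
  unfold pvSmin
  rw [List.drop_eq_getElem_cons hj]
  simp only [List.reverse_cons, List.foldl_append, List.foldl_cons, List.foldl_nil,
    List.getD_eq_getElem?_getD, List.getElem?_eq_getElem hj, Option.getD_some]

lemma smin_len (nums : List Int) : pvSmin nums nums.length = nums.getLast?.getD 0 := by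
  simp [pvSmin]

lemma pv_loop1 (nums : List Int) : ∀ (k : Nat), k ≤ nums.length →
    (List.range k).foldl
      (fun (st : List Bool × Int) (j : Nat) =>
        (st.1.set j (decide (st.2 ≤ nums.getD j 0)), max st.2 (nums.getD j 0)))
      (List.replicate nums.length false, nums.getD 0 0)
    = ((List.range nums.length).map
         (fun j => decide (j < k) && decide (pvFmax nums j ≤ nums.getD j 0)),
       pvFmax nums k) := by
  intro k
  induction k with
  | zero =>
    intro _
    refine Prod.ext ?_ ?_
    · apply List.ext_getElem (by simp)
      intro i h1 h2
      simp
    · simp [pvFmax]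
  | succ k ih =>
    intro hk
    rw [List.range_succ, List.foldl_append, ih (by omega), List.foldl_cons, List.foldl_nil]
    refine Prod.ext ?_ ?_
    · apply List.ext_getElem (by simp)
      intro i h1 h2
      simp only [List.getElem_set, List.getElem_map, List.getElem_range]
      by_cases hik : k = i
      · subst hik; simp
      · have : (i < k) = (i < k + 1) := by
          apply propext; constructor <;> intro <;> omega
        simp [hik, this]
    · exact (fmax_succ nums k (by omega)).symm

lemma pv_loop2 (nums : List Int) : ∀ (k : Nat), k ≤ nums.length → ∀ (c : Int),
    ((List.range k).reverse).foldl
      (fun (st : Int × Int) (j : Nat) =>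
        (min st.1 (nums.getD j 0),
         if ((List.range nums.length).map
              (fun i => decide (pvFmax nums i ≤ nums.getD i 0))).getD j false
            && decide (nums.getD j 0 ≤ min st.1 (nums.getD j 0))
         then st.2 + 1 else st.2))
      (pvSmin nums k, c)
    = (pvSmin nums 0, c + ((List.range k).countP (pvCond nums) : Int)) := by
  intro k
  induction k with
  | zero => intro _ c; simp
  | succ k ih =>
    intro hk c
    have hkn : k < nums.length := by omega
    have hmin : min (pvSmin nums (k+1)) (nums.getD k 0) = pvSmin nums k :=
      (smin_step nums k hkn).symm
    have hgd : ((List.range nums.length).map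
          (fun i => decide (pvFmax nums i ≤ nums.getD i 0))).getD k false
        = decide (pvFmax nums k ≤ nums.getD k 0) := by
      simp [List.getD_eq_getElem?_getD, hkn]
    rw [List.range_succ, List.reverse_append, List.reverse_singleton, List.singleton_append,
      List.foldl_cons, hmin, hgd]
    have hcond : (decide (pvFmax nums k ≤ nums.getD k 0)
        && decide (nums.getD k 0 ≤ pvSmin nums k)) = pvCond nums k := rfl
    rw [hcond, ih (by omega)]
    have hcnt : ((List.range (k+1)).countP (pvCond nums) : Int)
        = ((List.range k).countP (pvCond nums) : Int)
          + (if pvCond nums k then 1 else 0) := by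
      rw [List.range_succ, List.countP_append]
      by_cases h : pvCond nums k <;> simp [h] <;> push_cast <;> ring
    by_cases h : pvCond nums k <;> simp [h, hcnt] <;> omega

lemma pv_mapP (nums : List Int) :
    (List.range nums.length).map
      (fun j => decide (j < nums.length) && decide (pvFmax nums j ≤ nums.getD j 0))
    = (List.range nums.length).map
      (fun j => decide (pvFmax nums j ≤ nums.getD j 0)) := by
  apply List.map_congr_left
  intro j hj
  simp [List.mem_range.mp hj]

-- A's result is the count of indices satisfying pvCond
lemma pv_A_count (nums : List Int) (hne : nums ≠ []) :
    binarySearchableNumbers nums = ((List.range nums.length).countP (pvCond nums) : Int) := by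
  have h0 : PySem.List.pyGet? nums 0 = some (nums.getD 0 0) := by
    rw [PySem.List.pyGet?_zero]
    cases nums with
    | nil => simp at hne
    | cons a t => simp
  have hl : PySem.List.pyGet? nums (-1) = some (nums.getLast?.getD 0) := by
    rw [PySem.List.pyGet?_neg_one]
    cases hv : nums.getLast? with
    | none => exact absurd (List.getLast?_eq_none_iff.mp hv) hne
    | some v => simp
  have e1 : PySem.List.pyRange 0 (nums.length : Int) 1
      = (List.range nums.length).map (fun k : Nat => (k : Int)) := by
    rw [PySem.List.pyRange_one]; simp
  have e2 : PySem.List.pyRange ((nums.length : Int) - 1) (-1) (-1)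
      = ((List.range nums.length).reverse).map (fun k : Nat => (k : Int)) := by
    rw [PySem.List.pyRange_neg_one_eq_reverse, PySem.List.pyRange_one]
    simp [List.map_reverse]
  unfold binarySearchableNumbers
  rw [h0, hl]
  simp only [e1, e2, List.foldl_map, PySem.List.pySetD_natCast, PySem.List.pyGetD_natCast]
  rw [pv_loop1 nums nums.length le_rfl]
  simp only [pv_mapP]
  rw [show (nums.getLast?.getD 0) = pvSmin nums nums.length from (smin_len nums).symm]
  rw [pv_loop2 nums nums.length le_rfl 0]
  simp

-- popping from a ≤-sorted stack removes exactly the values above x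
lemma pvPop_sorted (x : Int) : ∀ (l : List Int), l.Pairwise (· ≤ ·) →
    pvPop x l = l.filter (fun v => decide (v ≤ x)) := by
  intro l
  induction l using pvPop.induct x with
  | case1 l h =>
    intro _
    rw [List.getLast?_eq_none_iff] at h
    subst h; simp [pvPop]
  | case2 l t h hxt ih =>
    intro hs
    have hdl : l = l.dropLast ++ [t] := (List.dropLast_append_getLast? t h).symm
    rw [pvPop, h]
    simp only [if_pos hxt]
    have hs' : l.dropLast.Pairwise (· ≤ ·) := by
      rw [hdl] at hs; exact (List.pairwise_append.mp hs).1
    rw [ih hs']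
    conv_rhs => rw [hdl]
    rw [List.filter_append]
    have : ¬ (t ≤ x) := by omega
    simp [this]
  | case3 l t h hxt =>
    intro hs
    rw [pvPop, h]
    simp only [if_neg hxt]
    have ht : t ≤ x := by omega
    have hdl : l = l.dropLast ++ [t] := (List.dropLast_append_getLast? t h).symm
    symm
    rw [List.filter_eq_self]
    intro a ha
    have : a ≤ t := by
      rw [hdl] at hs ha
      rcases List.mem_append.mp ha with h1 | h1
      · exact (List.pairwise_append.mp hs).2.2 a h1 t (by simp)
      · simp at h1; omega
    simp; omega

lemma pvOK_mono (nums : List Int) (i j : Nat) (hj : j ≤ i) :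
    pvOK nums (i+1) j = (pvOK nums i j && decide (nums.getD j 0 ≤ nums.getD i 0)) := by
  unfold pvOK
  have : i + 1 - j = (i - j) + 1 := by omega
  rw [this, List.range'_concat]
  have : j + 1 * (i - j) = i := by omega
  rw [this, List.all_append]
  simp [Bool.and_assoc]

lemma pvOK_self (nums : List Int) (i : Nat) :
    pvOK nums (i+1) i = decide (pvFmax nums i ≤ nums.getD i 0) := by
  unfold pvOK
  simp

-- the live-candidate list is sorted
lemma pv_S_sorted (nums : List Int) (i : Nat) :
    (((List.range i).filter (pvOK nums i)).map (fun j => nums.getD j 0)).Pairwise (· ≤ ·) := by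
  rw [List.pairwise_map]
  have hp : ((List.range i).filter (pvOK nums i)).Pairwise (· < ·) :=
    List.pairwise_lt_range.filter _
  refine hp.imp_of_mem ?_
  intro a b ha hb hab
  have hbi : b < i := List.mem_range.mp (List.mem_of_mem_filter hb)
  have hoka : pvOK nums i a = true := List.of_mem_filter ha
  unfold pvOK at hoka
  have := (Bool.and_eq_true _ _).mp hoka |>.2
  rw [List.all_eq_true] at this
  have hmem : b ∈ List.range' a (i - a) := by
    rw [List.mem_range'_1]
    omega
  simpa using this b hmem

-- loop invariant for B: after i elements, the stack holds the live candidates and m the prefix max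
lemma pv_invB (nums : List Int) (hne : nums ≠ []) : ∀ i, i ≤ nums.length →
    (nums.take i).foldl
      (fun (s : List Int × Int) x =>
        let s1 := pvPop x s.1
        (if s.2 ≤ x then s1 ++ [x] else s1, max s.2 x))
      ([], nums.getD 0 0)
    = (((List.range i).filter (pvOK nums i)).map (fun j => nums.getD j 0), pvFmax nums i) := by
  intro i
  induction i with
  | zero => intro _; simp [pvFmax]
  | succ i ih =>
    intro hi
    have hin : i < nums.length := by omega
    have htk : nums.take (i+1) = nums.take i ++ [nums.getD i 0] := by
      rw [List.take_add_one, List.getElem?_eq_getElem hin]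
      simp [List.getD_eq_getElem?_getD, List.getElem?_eq_getElem hin]
    rw [htk, List.foldl_append, ih (by omega), List.foldl_cons, List.foldl_nil]
    have hfilt : ((List.range i).filter (pvOK nums i)).filter
          (fun j => decide (nums.getD j 0 ≤ nums.getD i 0))
        = (List.range i).filter (pvOK nums (i+1)) := by
      rw [List.filter_filter]
      apply List.filter_congr
      intro j hj
      have hji : j < i := List.mem_range.mp hj
      rw [pvOK_mono nums i j (by omega)]
      rw [Bool.and_comm]
    have hpop : pvPop (nums.getD i 0)
        (((List.range i).filter (pvOK nums i)).map (fun j => nums.getD j 0))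
        = ((List.range i).filter (pvOK nums (i+1))).map (fun j => nums.getD j 0) := by
      rw [pvPop_sorted _ _ (pv_S_sorted nums i), List.filter_map, ← hfilt]
      rfl
    have hrng : (List.range (i+1)).filter (pvOK nums (i+1))
        = (List.range i).filter (pvOK nums (i+1))
          ++ (if pvOK nums (i+1) i then [i] else []) := by
      rw [List.range_succ, List.filter_append]
      by_cases h : pvOK nums (i+1) i = true <;> simp [h]
    refine Prod.ext ?_ ?_
    · simp only [hpop, hrng, List.map_append]
      by_cases h : pvFmax nums i ≤ nums.getD i 0
      · rw [if_pos h]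
        have : pvOK nums (i+1) i = true := by rw [pvOK_self]; simpa using h
        simp [this]
      · rw [if_neg h]
        have : pvOK nums (i+1) i = false := by
          rw [pvOK_self]; simpa using h
        simp [this]
    · exact (fmax_succ nums i hin).symm

-- nums[j] ≤ suffix min  ↔  nums[j] is ≤ every later element
lemma pv_smin_forall (nums : List Int) (v : Int) :
    ∀ d j, j + d = nums.length → j < nums.length →
      (v ≤ pvSmin nums j ↔ ∀ k ∈ List.range' j d, v ≤ nums.getD k 0) := by
  intro d
  induction d with
  | zero => intro j h1 h2; omega
  | succ d ih =>
    intro j h1 h2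
    have hstep := smin_step nums j h2
    rw [List.range'_succ, List.forall_mem_cons]
    cases d with
    | zero =>
      have hj : j = nums.length - 1 := by omega
      have hsm : pvSmin nums (j+1) = nums.getLast?.getD 0 := by
        have : j + 1 = nums.length := by omega
        rw [this, smin_len]
      have hlast : nums.getLast?.getD 0 = nums.getD j 0 := by
        have hne : nums ≠ [] := by intro h; subst h; simp at h2
        rw [List.getLast?_eq_getElem?]
        simp [List.getD_eq_getElem?_getD, hj]
      rw [hstep, hsm, hlast, min_self]
      simp
    | succ d' =>
      have hj1 : j + 1 < nums.length := by omega
      rw [hstep, le_min_iff, ih (j+1) (by omega) hj1]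
      tauto

lemma pv_cond_ok (nums : List Int) (j : Nat) (hj : j < nums.length) :
    pvCond nums j = pvOK nums nums.length j := by
  unfold pvCond pvOK
  congr 1
  rw [Bool.eq_iff_iff]
  simp only [decide_eq_true_eq, List.all_eq_true]
  constructor
  · intro h k hk
    have := (pv_smin_forall nums (nums.getD j 0) (nums.length - j) j (by omega) hj).mp h
    simpa using this k hk
  · intro h
    exact (pv_smin_forall nums (nums.getD j 0) (nums.length - j) j (by omega) hj).mpr
      (fun k hk => by simpa using h k hk)

lemma pv_B_count (nums : List Int) (hne : nums ≠ []) :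
    binarySearchableNumbers_alt nums
      = ((List.range nums.length).countP (pvCond nums) : Int) := by
  have h0 : PySem.List.pyGet? nums 0 = some (nums.getD 0 0) := by
    rw [PySem.List.pyGet?_zero]
    cases nums with
    | nil => simp at hne
    | cons a t => simp
  unfold binarySearchableNumbers_alt
  rw [h0]
  have := pv_invB nums hne nums.length le_rfl
  rw [List.take_length] at this
  simp only [this, List.length_map]
  rw [← List.countP_eq_length_filter]
  congr 1
  apply List.countP_congr
  intro j hj
  rw [pv_cond_ok nums j (List.mem_range.mp hj)]

theorem pv_main (nums : List Int) (hne : nums ≠ []) :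
    binarySearchableNumbers nums = binarySearchableNumbers_alt nums := by
  rw [pv_A_count nums hne, pv_B_count nums hne]

-- ===== VERDICT (by name: the statement is the Claim_ definition above) =====
theorem binarySearchableNumbers_spec : Claim_equal_binarySearchableNumbers := by
  intro nums _ hpre
  unfold Spec_binarySearchableNumbers
  exact pv_main nums hpre
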